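-- pv_equiv track=rewrite | github.com/er-hiba/Password_Evaluator | password_evaluator.py | longest_lowercase_sequence
-- ===== SOURCE A (Python) =====
-- def longest_lowercase_sequence(password):
--     longest_sequence = ""
--     current_sequence = ""
--
--     for char in password:
--         if char.islower():
--             current_sequence += char
--         else:
--             if len(current_sequence) > len(longest_sequence):
--                 longest_sequence = current_sequence
--             current_sequence = ""
--
--     if len(current_sequence) > len(longest_sequence):
--         longest_sequence = current_sequence
--
--     return longest_sequence
-- ===== SOURCE B (Python) =====
-- def longest_lowercase_sequence(password):
--     # Two-phase: collect all maximal lowercase runs by index scanning, then pick the longest.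
--     runs = []
--     i = 0
--     n = len(password)
--     while i < n:
--         if password[i].islower():
--             j = i
--             while j < n and password[j].islower():
--                 j += 1
--             runs.append(password[i:j])
--             i = j
--         else:
--             i += 1
--     return max(runs, key=len, default="")
-- ===== Notes on version B (the rewrite author's own statement) =====
-- stated objective: alternative
-- what changed: B first collects all maximal lowercase runs by scanning ahead with an index (two-phase), then selects the longest with max(key=len), instead of A's single pass with a longest/current string accumulator pair.
import Mathlib
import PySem

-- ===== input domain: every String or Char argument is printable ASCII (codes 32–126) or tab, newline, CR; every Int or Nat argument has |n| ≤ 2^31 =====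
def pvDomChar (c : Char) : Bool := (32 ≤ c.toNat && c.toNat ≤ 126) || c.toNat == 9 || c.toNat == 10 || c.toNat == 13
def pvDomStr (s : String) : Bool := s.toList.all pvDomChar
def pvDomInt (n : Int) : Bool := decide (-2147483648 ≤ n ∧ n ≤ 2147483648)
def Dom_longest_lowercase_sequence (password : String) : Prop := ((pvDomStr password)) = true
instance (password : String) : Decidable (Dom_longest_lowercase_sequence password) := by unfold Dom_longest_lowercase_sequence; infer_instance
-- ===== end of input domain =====

-- B collects all maximal lowercase runs first and then picks the longest with max(key=len),
-- instead of A's single pass with a longest/current accumulator pair; same cost, different decomposition.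


-- ===== PORT A =====
-- A's loop over the characters, carrying (longest_sequence, current_sequence);
-- the final 'if' of A is the base case.
def pvLoopA : List Char → List Char × List Char → List Char
  | [], (longest, cur) => if cur.length > longest.length then cur else longest
  | c :: cs, (longest, cur) =>
      if PySem.Chars.islower c then
        pvLoopA cs (longest, cur ++ [c])
      else
        pvLoopA cs ((if cur.length > longest.length then cur else longest), [])

def longest_lowercase_sequence (password : String) : String :=
  String.ofList (pvLoopA password.toList ([], []))

-- ===== PORT B =====
-- phase 1 of Source B: scan ahead while lowercase (inner while = takeWhile/dropWhile), collecting runs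
def pvRuns : List Char → List (List Char)
  | [] => []
  | c :: cs =>
      if PySem.Chars.islower c then
        (c :: cs.takeWhile PySem.Chars.islower) :: pvRuns (cs.dropWhile PySem.Chars.islower)
      else
        pvRuns cs
  termination_by l => l.length
  decreasing_by
    · simp only [List.length_cons]
      exact Nat.lt_succ_of_le (List.length_dropWhile_le _ _)
    · simp

-- phase 2 of Source B: max(runs, key=len, default="") — first run of maximal length
def pvMaxByLen : List (List Char) → List Char
  | [] => []
  | r :: rs => rs.foldl (fun b x => if x.length > b.length then x else b) r

def longest_lowercase_sequence_alt (password : String) : String :=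
  String.ofList (pvMaxByLen (pvRuns password.toList))

-- ===== PRECONDITION & SPEC =====
def Spec_longest_lowercase_sequence (password : String) (out : String) : Prop := out = longest_lowercase_sequence_alt password
instance (password : String) (out : String) : Decidable (Spec_longest_lowercase_sequence password out) := by unfold Spec_longest_lowercase_sequence; infer_instance

-- ===== CLAIM (what is proved, stated in full; the proofs are below) =====
def Claim_equal_longest_lowercase_sequence : Prop := ∀ (password : String), Dom_longest_lowercase_sequence password → Spec_longest_lowercase_sequence password (longest_lowercase_sequence password)

-- ===== LEMMAS AND PROOFS =====

-- the binary "keep the strictly longer" step shared by both sides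
def pvBest (l r : List Char) : List Char := if r.length > l.length then r else l

lemma pvBest_nil (l : List Char) : pvBest l [] = l := by simp [pvBest]

-- the runs A's loop still has ahead of it, with current run prefix C
def pvG (C : List Char) : List Char → List (List Char)
  | [] => [C]
  | c :: cs => if PySem.Chars.islower c then pvG (C ++ [c]) cs else C :: pvG [] cs

-- A's loop folds pvBest over those runs
lemma loopA_eq_foldl_g : ∀ (cs : List Char) (L C : List Char),
    pvLoopA cs (L, C) = (pvG C cs).foldl pvBest L := by
  intro cs
  induction cs with
  | nil => intro L C; simp [pvLoopA, pvG, pvBest]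
  | cons c cs ih =>
      intro L C
      by_cases h : PySem.Chars.islower c
      · simp [pvLoopA, pvG, h, ih]
      · simp [pvLoopA, pvG, h, ih, pvBest]

-- pvG C cs = (C ++ first run) followed by the remaining maximal runs, up to the fold
lemma foldl_g_eq : ∀ (n : ℕ) (cs : List Char), cs.length ≤ n → ∀ (C L : List Char),
    (pvG C cs).foldl pvBest L
      = ((C ++ cs.takeWhile PySem.Chars.islower) :: pvRuns (cs.dropWhile PySem.Chars.islower)).foldl pvBest L := by
  intro n
  induction n with
  | zero =>
      intro cs hcs C L
      have : cs = [] := List.eq_nil_of_length_eq_zero (Nat.le_zero.mp hcs)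
      subst this; simp [pvG, pvRuns]
  | succ n ih =>
      intro cs hcs C L
      cases cs with
      | nil => simp [pvG, pvRuns]
      | cons c cs =>
          by_cases h : PySem.Chars.islower c
          · simp only [pvG, h, if_pos, List.takeWhile_cons_of_pos, List.dropWhile_cons_of_pos]
            rw [ih cs (by simpa using Nat.lt_succ_iff.mp (Nat.lt_of_lt_of_le (by simp) hcs)) (C ++ [c]) L]
            simp
          · simp only [pvG, h, if_neg, Bool.false_eq_true, not_false_eq_true,
              List.takeWhile_cons_of_neg, List.dropWhile_cons_of_neg, List.append_nil]
            have hlen : cs.length ≤ n := by simpa using Nat.lt_succ_iff.mp (Nat.lt_of_lt_of_le (by simp) hcs)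
            rw [List.foldl_cons, List.foldl_cons, ih cs hlen [] (pvBest L C)]
            -- reduce the leading (possibly empty) first-run entry on both sides
            cases hcs' : cs with
            | nil => simp [pvRuns, pvBest, h]
            | cons c' cs' =>
                by_cases h' : PySem.Chars.islower c'
                · simp [pvRuns, h, h', List.takeWhile_cons_of_pos, List.dropWhile_cons_of_pos]
                · simp [pvRuns, h, h', List.takeWhile_cons_of_neg, List.dropWhile_cons_of_neg, pvBest_nil]

-- every run produced by pvRuns is nonempty (we only need the head)
lemma pvRuns_head_ne_nil : ∀ (cs : List Char) (r : List Char) (rs : List (List Char)),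
    pvRuns cs = r :: rs → r ≠ [] := by
  intro cs
  induction cs using pvRuns.induct with
  | case1 => intro r rs h; simp [pvRuns] at h
  | case2 c cs h _ =>
      intro r rs hr
      simp only [pvRuns, h, if_pos] at hr
      intro hnil; subst hnil
      simpa using ((List.cons.injEq _ _ _ _).mp hr).1
  | case3 c cs h ih =>
      intro r rs hr
      simp only [pvRuns, h, Bool.false_eq_true, if_neg, not_false_eq_true] at hr
      exact ih r rs hr

-- folding pvBest from [] equals Source B's max(..., default="") over pvRuns
lemma foldl_eq_maxByLen (cs : List Char) :
    (pvRuns cs).foldl pvBest [] = pvMaxByLen (pvRuns cs) := by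
  cases hr : pvRuns cs with
  | nil => simp [pvMaxByLen]
  | cons r rs =>
      have hne : r ≠ [] := pvRuns_head_ne_nil cs r rs hr
      have hlen : 0 < r.length := List.length_pos_iff.mpr hne
      simp only [pvMaxByLen, List.foldl_cons]
      have : pvBest [] r = r := by simp [pvBest, hlen]
      rw [this]
      rfl

lemma loopA_eq_runs (cs : List Char) :
    pvLoopA cs ([], []) = pvMaxByLen (pvRuns cs) := by
  rw [loopA_eq_foldl_g cs [] [],
      foldl_g_eq cs.length cs le_rfl [] []]
  rw [← foldl_eq_maxByLen cs]
  cases cs with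
  | nil => simp [pvRuns, pvBest]
  | cons c cs' =>
      by_cases h : PySem.Chars.islower c
      · simp [pvRuns, h, List.takeWhile_cons_of_pos, List.dropWhile_cons_of_pos]
      · simp [pvRuns, h, List.takeWhile_cons_of_neg, List.dropWhile_cons_of_neg, pvBest_nil]

-- ===== VERDICT (by name: the statement is the Claim_ definition above) =====
theorem longest_lowercase_sequence_spec : Claim_equal_longest_lowercase_sequence := by
  intro password _
  unfold Spec_longest_lowercase_sequence longest_lowercase_sequence longest_lowercase_sequence_alt
  rw [loopA_eq_runs]
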